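-- pv_equiv track=rewrite | github.com/bssrdf/pyleet | LongestIncreasingSubsequenceII.py | lengthOfLIS3
-- ===== SOURCE A (Python) =====
-- from typing import List
--
-- class SEG:
--     def __init__(self, n):
--         self.n = n
--         self.tree = [0] * 2 * self.n
--
--     def query(self, l, r):
--         l += self.n
--         r += self.n
--         ans = 0
--         while l < r:
--             if l & 1: # same as l % 2, aka l is odd
--                 ans = max(ans, self.tree[l])
--                 l += 1 # l is even now
--             if r & 1: # same as r % 2, aka r is odd
--                 r -= 1 # r is even now
--                 ans = max(ans, self.tree[r])
--             l >>= 1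
--             r >>= 1
--         return ans
--
--     def update(self, i, val):
--         i += self.n
--         self.tree[i] = val
--         while i > 1:
--             i >>= 1
--             self.tree[i] = max(self.tree[i * 2], self.tree[i * 2 + 1])
--
-- def lengthOfLIS3(nums: List[int], k: int) -> int:
--     A = nums
--     n, ans = max(A)+1, 1
--     seg = SEG(n)
--     for a in A:
--         # a -= 1
--         premax = seg.query(max(0, a - k), a)
--         ans = max(ans, premax + 1)
--         seg.update(a, premax + 1)
--     return ans
-- ===== SOURCE B (Python) =====
-- def lengthOfLIS3(nums, k):
--     n = max(nums) + 1
--     dp = [0] * n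
--     ans = 1
--     for a in nums:
--         premax = max(dp[max(0, a - k):a], default=0)
--         ans = max(ans, premax + 1)
--         dp[a] = premax + 1
--     return ans
-- ===== Notes on version B (the rewrite author's own statement) =====
-- stated objective: simpler
-- what changed: A's iterative segment tree (query by tree climb, update by ancestor recomputation) is replaced by a plain value-indexed dp array whose range maximum is taken by a direct slice scan, max(dp[max(0,a-k):a], default=0).
-- outside the precondition, e.g. on lengthOfLIS3([7, -4, 5, 6, 4, 7], 2): A returns 3, B returns 4
import Mathlib
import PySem

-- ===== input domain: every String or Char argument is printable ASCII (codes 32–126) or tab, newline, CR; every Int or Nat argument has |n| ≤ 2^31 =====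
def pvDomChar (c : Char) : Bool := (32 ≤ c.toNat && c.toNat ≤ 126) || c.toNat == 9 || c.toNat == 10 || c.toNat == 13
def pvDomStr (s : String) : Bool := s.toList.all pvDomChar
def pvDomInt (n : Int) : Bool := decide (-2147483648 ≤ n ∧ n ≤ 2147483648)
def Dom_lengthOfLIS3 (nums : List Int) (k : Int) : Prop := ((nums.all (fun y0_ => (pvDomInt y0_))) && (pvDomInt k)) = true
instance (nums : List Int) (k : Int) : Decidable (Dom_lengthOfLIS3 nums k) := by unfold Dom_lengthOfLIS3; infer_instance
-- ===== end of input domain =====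

-- B replaces A's iterative segment tree by a plain value-indexed dp array whose range
-- maximum is taken by a direct slice scan (objective: simpler; not faster).

-- ===== PORT A =====
-- tree[i] read; in range under Pre_, negative indices wrap as in Python (exact there)
def segGet (t : List Int) (i : Int) : Int := PySem.List.pyGetD t i 0

-- SEG.query's while loop; the fuel only makes the recursion total (it never runs out:
-- 64 ≥ the bit length of any tree index reachable under Dom_ ∧ Pre_)
def segQueryLoop (fuel : Nat) (t : List Int) (l r ans : Int) : Int :=
  match fuel with
  | 0 => ans
  | f + 1 =>
    if l < r then
      let s1 := if PySem.Int.band l 1 = 1 then (max ans (segGet t l), l + 1) else (ans, l)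
      let s2 := if PySem.Int.band r 1 = 1 then (max s1.1 (segGet t (r - 1)), r - 1) else (s1.1, r)
      segQueryLoop f t (PySem.Int.floordiv s1.2 2) (PySem.Int.floordiv s2.2 2) s2.1
    else ans

-- SEG.update's while loop (i >>= 1 is floor division by 2); same fuel remark
def segUpdLoop (fuel : Nat) (t : List Int) (i : Int) : List Int :=
  match fuel with
  | 0 => t
  | f + 1 =>
    if 1 < i then
      let i' := PySem.Int.floordiv i 2
      segUpdLoop f (PySem.List.pySetD t i' (max (segGet t (i' * 2)) (segGet t (i' * 2 + 1)))) i'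
    else t

def segQuery (t : List Int) (n l r : Int) : Int := segQueryLoop 64 t (l + n) (r + n) 0

def segUpdate (t : List Int) (n i v : Int) : List Int :=
  segUpdLoop 64 (PySem.List.pySetD t (i + n) v) (i + n)

def lengthOfLIS3 (nums : List Int) (k : Int) : Int :=
  match PySem.List.max? nums (fun x => x) with
  | none => 0  -- unreachable under Pre_: max([]) raises ValueError
  | some m =>
    let n := m + 1
    (nums.foldl (fun (st : List Int × Int) a =>
        let premax := segQuery st.1 n (max 0 (a - k)) a
        (segUpdate st.1 n a (premax + 1), max st.2 (premax + 1)))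
      (List.replicate (2 * n).toNat 0, 1)).2

-- ===== PORT B =====
def lengthOfLIS3_alt (nums : List Int) (k : Int) : Int :=
  match PySem.List.max? nums (fun x => x) with
  | none => 0  -- unreachable under Pre_: max([]) raises ValueError
  | some m =>
    let n := m + 1
    (nums.foldl (fun (st : List Int × Int) a =>
        let premax := PySem.List.maxD
          (PySem.List.slice st.1 (some (max 0 (a - k))) (some a)) (fun x => x) 0
        (PySem.List.pySetD st.1 a (premax + 1), max st.2 (premax + 1)))
      (List.replicate n.toNat 0, 1)).2

-- ===== PRECONDITION & SPEC =====
-- Pre_ excludes the empty list (max([]) raises ValueError in both programs) and lists with a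
-- negative element, outside the task's natural domain, where A's value comes from Python's
-- negative-index wraparound into the tree array and is accidental.
def Pre_lengthOfLIS3 (nums : List Int) (k : Int) : Prop :=
  nums ≠ [] ∧ ∀ x ∈ nums, 0 ≤ x
instance (nums : List Int) (k : Int) : Decidable (Pre_lengthOfLIS3 nums k) := by
  unfold Pre_lengthOfLIS3; infer_instance

def pvWitness_lengthOfLIS3 : List Int × Int := ([1, 3, 2, 4], 2)

def Spec_lengthOfLIS3 (nums : List Int) (k : Int) (out : Int) : Prop := out = lengthOfLIS3_alt nums k
instance (nums : List Int) (k : Int) (out : Int) : Decidable (Spec_lengthOfLIS3 nums k out) := by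
  unfold Spec_lengthOfLIS3; infer_instance

-- ===== CLAIM (what is proved, stated in full; the proofs are below) =====
def Claim_equal_lengthOfLIS3 : Prop := ∀ (nums : List Int) (k : Int), Dom_lengthOfLIS3 nums k → Pre_lengthOfLIS3 nums k → Spec_lengthOfLIS3 nums k (lengthOfLIS3 nums k)

-- ===== LEMMAS AND PROOFS =====

def Minterval (t : List Int) (l r acc : Int) : Int :=
  if h : l < r then Minterval t (l + 1) r (max acc (segGet t l)) else acc
termination_by (r - l).toNat
decreasing_by omega

lemma M_stop (t : List Int) (l r acc : Int) (h : ¬ l < r) : Minterval t l r acc = acc := by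
  rw [Minterval, dif_neg h]

lemma M_step (t : List Int) (l r acc : Int) (h : l < r) :
    Minterval t l r acc = Minterval t (l + 1) r (max acc (segGet t l)) := by
  rw [Minterval, dif_pos h]

lemma M_acc (t : List Int) (l r : Int) (acc b : Int) :
    Minterval t l r (max acc b) = max (Minterval t l r acc) b := by
  by_cases h : l < r
  · have : (r - (l+1)).toNat < (r - l).toNat := by omega
    rw [M_step _ _ _ _ h, M_step _ _ _ _ h, max_right_comm acc b (segGet t l)]
    exact M_acc t (l+1) r (max acc (segGet t l)) b
  · rw [M_stop _ _ _ _ h, M_stop _ _ _ _ h]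
termination_by (r - l).toNat
decreasing_by omega

lemma M_last (t : List Int) (l r acc : Int) (h : l < r) :
    Minterval t l r acc = max (Minterval t l (r - 1) acc) (segGet t (r - 1)) := by
  by_cases h2 : l < r - 1
  · rw [M_step _ _ _ _ h, M_step _ _ _ _ h2]
    exact M_last t (l+1) r (max acc (segGet t l)) (by omega)
  · have hlr : l = r - 1 := by omega
    rw [M_step _ _ _ _ h, hlr, M_stop _ _ _ _ (by omega), M_stop _ _ _ _ (by omega)]
termination_by (r - l).toNat
decreasing_by omega

lemma M_ge_acc (t : List Int) (l r acc : Int) : acc ≤ Minterval t l r acc := by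
  by_cases h : l < r
  · rw [M_step _ _ _ _ h]
    exact le_trans (le_max_left _ _) (M_ge_acc t (l+1) r _)
  · rw [M_stop _ _ _ _ h]
termination_by (r - l).toNat
decreasing_by omega

lemma M_collapse (t : List Int) (n : Int)
    (hint : ∀ p : Int, 1 ≤ p → p < n → segGet t p = max (segGet t (2 * p)) (segGet t (2 * p + 1)))
    (a b acc : Int) (ha : 1 ≤ a) (hab : a ≤ b) (hb : b ≤ n) :
    Minterval t (2 * a) (2 * b) acc = Minterval t a b acc := by
  by_cases h : a < b
  · rw [M_step t (2*a) (2*b) acc (by omega), M_step t (2*a+1) (2*b) _ (by omega)]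
    rw [show (2*a+1+1) = 2*(a+1) by ring]
    rw [max_assoc, ← hint a ha (by omega)]
    rw [M_collapse t n hint (a+1) b _ (by omega) (by omega) hb]
    rw [M_step t a b acc h]
  · have : a = b := by omega
    subst this
    rw [M_stop _ _ _ _ (by omega), M_stop _ _ _ _ (by omega)]
termination_by (b - a).toNat
decreasing_by omega

lemma segGet_set (t : List Int) (i x v : Int) (hi0 : 0 ≤ i) (hi1 : i < t.length) (hx : 0 ≤ x) :
    segGet (PySem.List.pySetD t i v) x = if x = i then v else segGet t x := by
  have hi : i = ((i.toNat : Nat) : Int) := by omega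
  have hxx : x = ((x.toNat : Nat) : Int) := by omega
  rw [segGet, segGet, hi, hxx, PySem.List.pyGetD_pySetD_natCast t i.toNat x.toNat v 0 (by omega)]
  by_cases h : x.toNat = i.toNat
  · rw [if_pos h, if_pos (by omega)]
  · rw [if_neg h, if_neg (by omega)]

lemma segGet_replicate (N : Nat) (x : Int) : segGet (List.replicate N (0 : Int)) x = 0 := by
  rw [segGet]
  rcases h : PySem.List.pyGet? (List.replicate N (0:Int)) x with _ | y
  · simp [PySem.List.pyGetD, h]
  · have hy := PySem.List.mem_of_pyGet?_eq_some _ h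
    have : y = 0 := List.eq_of_mem_replicate hy
    simp [PySem.List.pyGetD, h, this]

lemma qloop (t : List Int) (n : Int)
    (hint : ∀ p : Int, 1 ≤ p → p < n → segGet t p = max (segGet t (2 * p)) (segGet t (2 * p + 1))) :
    ∀ (fuel : Nat) (l r acc : Int) (d : Nat), 1 ≤ l → l ≤ r →
      n ≤ l * 2 ^ d → r * 2 ^ d ≤ 2 * n → r ≤ (2 : Int) ^ fuel →
      segQueryLoop fuel t l r acc = Minterval t l r acc := by
  intro fuel
  induction fuel with
  | zero =>
    intro l r acc d h1 h2 h3 h4 h5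
    have h5' : r ≤ 1 := by simpa using h5
    have : ¬ l < r := by omega
    rw [segQueryLoop, M_stop _ _ _ _ this]
  | succ f ih =>
    intro l r acc d h1 h2 h3 h4 h5
    have hpow : ((2:Int) ^ (f+1)) = 2 * 2 ^ f := by ring
    have hdpos : (0:Int) < 2 ^ d := by positivity
    have hd1 : ((2:Int) ^ (d+1)) = 2 ^ d * 2 := by ring
    by_cases hlr : l < r
    · rw [segQueryLoop, if_pos hlr]
      simp only [PySem.Int.band_one,
        PySem.Int.mod_eq_emod_of_pos (by norm_num : (0:Int) < 2),
        PySem.Int.floordiv_eq_ediv_of_pos (by norm_num : (0:Int) < 2)]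
      rcases (show l % 2 = 0 ∨ l % 2 = 1 from by omega) with hpl | hpl <;>
        rcases (show r % 2 = 0 ∨ r % 2 = 1 from by omega) with hpr | hpr
      · -- both even
        rw [if_neg (by omega), if_neg (by omega)]
        obtain ⟨lc, hlc⟩ : ∃ c, l = 2 * c := ⟨l / 2, by omega⟩
        obtain ⟨rc, hrc⟩ : ∃ c, r = 2 * c := ⟨r / 2, by omega⟩
        have e1 : l / 2 = lc := by omega
        have e2 : r / 2 = rc := by omega
        simp only [e1, e2]
        rw [ih lc rc acc (d+1) (by omega) (by omega)
          (by rw [hd1]; nlinarith) (by rw [hd1]; nlinarith) (by omega)]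
        rw [← M_collapse t n hint lc rc acc (by omega) (by omega) (by nlinarith),
          ← hlc, ← hrc]
      · -- l even, r odd
        rw [if_neg (by omega), if_pos (by omega)]
        obtain ⟨lc, hlc⟩ : ∃ c, l = 2 * c := ⟨l / 2, by omega⟩
        obtain ⟨rc, hrc⟩ : ∃ c, r - 1 = 2 * c := ⟨(r-1) / 2, by omega⟩
        have e1 : l / 2 = lc := by omega
        have e2 : (r - 1) / 2 = rc := by omega
        simp only [e1, e2]
        rw [ih lc rc (max acc (segGet t (r-1))) (d+1) (by omega) (by omega)
          (by rw [hd1]; nlinarith) (by rw [hd1]; nlinarith) (by omega)]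
        rw [← M_collapse t n hint lc rc _ (by omega) (by omega) (by nlinarith),
          ← hlc, ← hrc, M_acc, ← M_last t l r acc hlr]
      · -- l odd, r even
        rw [if_pos (by omega), if_neg (by omega)]
        obtain ⟨lc, hlc⟩ : ∃ c, l + 1 = 2 * c := ⟨(l+1) / 2, by omega⟩
        obtain ⟨rc, hrc⟩ : ∃ c, r = 2 * c := ⟨r / 2, by omega⟩
        have e1 : (l + 1) / 2 = lc := by omega
        have e2 : r / 2 = rc := by omega
        simp only [e1, e2]
        rw [ih lc rc (max acc (segGet t l)) (d+1) (by omega) (by omega)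
          (by rw [hd1]; nlinarith) (by rw [hd1]; nlinarith) (by omega)]
        rw [← M_collapse t n hint lc rc _ (by omega) (by omega) (by nlinarith),
          ← hlc, ← hrc, ← M_step t l r acc hlr]
      · -- both odd
        rw [if_pos (by omega), if_pos (by omega)]
        obtain ⟨lc, hlc⟩ : ∃ c, l + 1 = 2 * c := ⟨(l+1) / 2, by omega⟩
        obtain ⟨rc, hrc⟩ : ∃ c, r - 1 = 2 * c := ⟨(r-1) / 2, by omega⟩
        have e1 : (l + 1) / 2 = lc := by omega
        have e2 : (r - 1) / 2 = rc := by omega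
        simp only [e1, e2]
        have hlr2 : l + 1 ≤ r - 1 := by omega
        rw [ih lc rc _ (d+1) (by omega) (by omega)
          (by rw [hd1]; nlinarith) (by rw [hd1]; nlinarith) (by omega)]
        rw [← M_collapse t n hint lc rc _ (by omega) (by omega) (by nlinarith),
          ← hlc, ← hrc, M_acc, ← M_last t (l+1) r (max acc (segGet t l)) (by omega),
          ← M_step t l r acc hlr]
    · rw [segQueryLoop, if_neg hlr, M_stop _ _ _ _ hlr]

lemma qloop_empty (f : Nat) (t : List Int) (l r acc : Int) (h : r ≤ l) :
    segQueryLoop (f + 1) t l r acc = acc := by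
  rw [segQueryLoop, if_neg (by omega)]

lemma M_leaf (t dp : List Int) (n : Int)
    (hleaf : ∀ x : Int, 0 ≤ x → x < n → segGet t (x + n) = segGet dp x) :
    ∀ (l r acc : Int), 0 ≤ l → r ≤ n → Minterval t (l + n) (r + n) acc = Minterval dp l r acc := by
  intro l r acc hl hr
  by_cases h : l < r
  · rw [M_step t (l+n) (r+n) acc (by omega), M_step dp l r acc h,
      hleaf l hl (by omega), show l + n + 1 = (l + 1) + n from by ring]
    exact M_leaf t dp n hleaf (l+1) r _ (by omega) hr
  · rw [M_stop _ _ _ _ (by omega), M_stop _ _ _ _ h]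
termination_by l r acc => (r - l).toNat
decreasing_by omega

lemma M_eq_foldl (dp : List Int) :
    ∀ (l r acc : Int), 0 ≤ l → r ≤ dp.length →
      Minterval dp l r acc = (List.take (r.toNat - l.toNat) (List.drop l.toNat dp)).foldl max acc := by
  intro l r acc hl hr
  by_cases h : l < r
  · have hlen : l.toNat < dp.length := by omega
    rw [M_step dp l r acc h, List.drop_eq_getElem_cons hlen]
    rw [show r.toNat - l.toNat = (r.toNat - (l+1).toNat) + 1 from by omega, List.take_succ_cons]
    rw [List.foldl_cons]
    rw [segGet, PySem.List.pyGetD_eq_getElem dp 0 hl (by omega)]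
    have := M_eq_foldl dp (l+1) r (max acc dp[l.toNat]) (by omega) hr
    rw [this, show (l+1).toNat = l.toNat + 1 from by omega]
  · rw [M_stop _ _ _ _ h, show r.toNat - l.toNat = 0 from by omega, List.take_zero, List.foldl_nil]
termination_by l r acc => (r - l).toNat
decreasing_by omega

lemma maxD_nonneg (xs : List Int) (h : ∀ x ∈ xs, 0 ≤ x) :
    PySem.List.maxD xs (fun x => x) 0 = xs.foldl max 0 := by
  cases xs with
  | nil => rfl
  | cons x t =>
    rw [PySem.List.maxD, PySem.List.max?_id_cons, Option.getD_some, List.foldl_cons,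
      max_eq_right (h x (by simp))]

lemma btop (dp : List Int) (n l r : Int) (hlen : dp.length = n.toNat) (hnn : ∀ x ∈ dp, 0 ≤ x)
    (hl : 0 ≤ l) (hlr : l ≤ r) (hr : r ≤ n) :
    PySem.List.maxD (PySem.List.slice dp (some l) (some r)) (fun x => x) 0 = Minterval dp l r 0 := by
  rw [PySem.List.slice_toNat dp hl (by omega)]
  rw [maxD_nonneg _ (fun x hx => hnn x (List.mem_of_mem_drop (List.mem_of_mem_take hx)))]
  rw [M_eq_foldl dp l r 0 hl (by omega)]

def SegInv (n : Int) (dp t : List Int) : Prop :=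
  1 ≤ n ∧ dp.length = n.toNat ∧ t.length = (2 * n).toNat ∧
  (∀ x : Int, 0 ≤ x → x < n → segGet t (x + n) = segGet dp x) ∧
  (∀ p : Int, 1 ≤ p → p < n → segGet t p = max (segGet t (2 * p)) (segGet t (2 * p + 1))) ∧
  (∀ x ∈ dp, 0 ≤ x)

lemma qtop (t dp : List Int) (n l r : Int) (hInv : SegInv n dp t)
    (hl : 0 ≤ l) (hlr : l ≤ r) (hr : r ≤ n) (hn : n ≤ 2 ^ 31 + 1) :
    segQuery t n l r = Minterval dp l r 0 := by
  obtain ⟨h1, h2, h3, hleaf, hint, hpos⟩ := hInv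
  rw [segQuery, qloop t n hint 64 (l+n) (r+n) 0 0 (by omega) (by omega)
    (by norm_num; omega) (by norm_num; omega) (by norm_num; omega)]
  exact M_leaf t dp n hleaf l r 0 hl hr

def Anc (j p : Int) : Prop := ∃ d : Nat, 0 < d ∧ p = j / 2 ^ d

lemma anc_one (p : Int) (hp : 1 ≤ p) : ¬ Anc 1 p := by
  rintro ⟨d, hd, rfl⟩
  have h2 : (2:Int) ≤ 2 ^ d := by
    calc (2:Int) = 2 ^ 1 := by norm_num
    _ ≤ 2 ^ d := by apply pow_le_pow_right₀ <;> omega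
  have : (1:Int) / 2 ^ d = 0 := Int.ediv_eq_zero_of_lt (by norm_num) (by omega)
  omega

lemma anc_shift (j p : Int) (hj : 0 ≤ j) (h : Anc j p) (hne : p ≠ j / 2) : Anc (j / 2) p := by
  obtain ⟨d, hd, rfl⟩ := h
  rcases Nat.eq_or_lt_of_le hd with hd1 | hd1
  · exact absurd (by rw [← hd1]; norm_num) hne
  · refine ⟨d - 1, by omega, ?_⟩
    rw [Int.ediv_ediv_of_nonneg (by norm_num : (0:Int) ≤ 2)]
    congr 1
    rw [show (2:Int) * 2 ^ (d-1) = 2 ^ (d - 1 + 1) from by ring]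
    congr 1
    omega

lemma uloop (n : Int) (hn : 1 ≤ n) :
    ∀ (fuel : Nat) (t : List Int) (j : Int), 1 ≤ j → j < 2 * n → j ≤ (2 : Int) ^ fuel →
      t.length = (2 * n).toNat →
      (∀ p : Int, 1 ≤ p → p < n → ¬ Anc j p →
        segGet t p = max (segGet t (2 * p)) (segGet t (2 * p + 1))) →
      (segUpdLoop fuel t j).length = t.length ∧
      (∀ x : Int, n ≤ x → segGet (segUpdLoop fuel t j) x = segGet t x) ∧
      (∀ p : Int, 1 ≤ p → p < n →
        segGet (segUpdLoop fuel t j) p =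
          max (segGet (segUpdLoop fuel t j) (2 * p)) (segGet (segUpdLoop fuel t j) (2 * p + 1))) := by
  intro fuel
  induction fuel with
  | zero =>
    intro t j hj1 hj2 hjf hlen hyp
    have hj : j = 1 := by have : j ≤ 1 := by simpa using hjf
                          omega
    subst hj
    rw [segUpdLoop]
    exact ⟨rfl, fun x _ => rfl, fun p hp1 hp2 => hyp p hp1 hp2 (anc_one p hp1)⟩
  | succ f ih =>
    intro t j hj1 hj2 hjf hlen hyp
    by_cases hj : 1 < j
    · rw [segUpdLoop, if_pos hj]
      simp only [PySem.Int.floordiv_eq_ediv_of_pos (by norm_num : (0:Int) < 2)]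
      have hpow : ((2:Int) ^ (f+1)) = 2 * 2 ^ f := by ring
      have hi1 : 1 ≤ j / 2 := by omega
      have hi2 : j / 2 < n := by omega
      have hif : j / 2 ≤ (2:Int) ^ f := by omega
      have hTl : ((t.length : Nat) : Int) = 2 * n := by omega
      have hiR : (j / 2) < (t.length : Int) := by omega
      set v := max (segGet t (j / 2 * 2)) (segGet t (j / 2 * 2 + 1)) with hv
      have hlen' : (PySem.List.pySetD t (j / 2) v).length = (2 * n).toNat := by
        rw [PySem.List.length_pySetD]; exact hlen
      have hget : ∀ x : Int, 0 ≤ x →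
          segGet (PySem.List.pySetD t (j / 2) v) x = if x = j / 2 then v else segGet t x :=
        fun x hx => segGet_set t (j / 2) x v (by omega) hiR hx
      have hyp' : ∀ p : Int, 1 ≤ p → p < n → ¬ Anc (j / 2) p →
          segGet (PySem.List.pySetD t (j / 2) v) p =
            max (segGet (PySem.List.pySetD t (j / 2) v) (2 * p))
                (segGet (PySem.List.pySetD t (j / 2) v) (2 * p + 1)) := by
        intro p hp1 hp2 hpanc
        have hc1 : 2 * p ≠ j / 2 := by
          intro hc; exact hpanc ⟨1, by norm_num, by omega⟩
        have hc2 : 2 * p + 1 ≠ j / 2 := by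
          intro hc; exact hpanc ⟨1, by norm_num, by omega⟩
        rw [hget (2*p) (by omega), if_neg hc1, hget (2*p+1) (by omega), if_neg hc2,
          hget p (by omega)]
        by_cases hpi : p = j / 2
        · rw [if_pos hpi, hv, hpi, show j / 2 * 2 = 2 * (j / 2) from by ring]
        · rw [if_neg hpi]
          refine hyp p hp1 hp2 ?_
          intro hAnc
          exact hpanc (anc_shift j p (by omega) hAnc hpi)
      obtain ⟨L, Lv, Lint⟩ := ih (PySem.List.pySetD t (j / 2) v) (j / 2) hi1 (by omega) hif hlen' hyp'
      refine ⟨by rw [L, PySem.List.length_pySetD], ?_, Lint⟩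
      intro x hx
      rw [Lv x hx, hget x (by omega), if_neg (by omega)]
    · have hj' : j = 1 := by omega
      subst hj'
      rw [segUpdLoop, if_neg hj]
      exact ⟨rfl, fun x _ => rfl, fun p hp1 hp2 => hyp p hp1 hp2 (anc_one p hp1)⟩

lemma utop (t dp : List Int) (n i v : Int) (hInv : SegInv n dp t)
    (hi0 : 0 ≤ i) (hi1 : i < n) (hv : 0 ≤ v) (hn : n ≤ 2 ^ 31 + 1) :
    SegInv n (PySem.List.pySetD dp i v) (segUpdate t n i v) := by
  obtain ⟨h1, h2, h3, hleaf, hint, hpos⟩ := hInv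
  have hTl : ((t.length : Nat) : Int) = 2 * n := by omega
  have hDl : ((dp.length : Nat) : Int) = n := by omega
  have hgetT : ∀ x : Int, 0 ≤ x →
      segGet (PySem.List.pySetD t (i + n) v) x = if x = i + n then v else segGet t x :=
    fun x hx => segGet_set t (i + n) x v (by omega) (by omega) hx
  have hlen1 : (PySem.List.pySetD t (i + n) v).length = (2 * n).toNat := by
    rw [PySem.List.length_pySetD]; exact h3
  have hyp : ∀ p : Int, 1 ≤ p → p < n → ¬ Anc (i + n) p →
      segGet (PySem.List.pySetD t (i + n) v) p =
        max (segGet (PySem.List.pySetD t (i + n) v) (2 * p))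
            (segGet (PySem.List.pySetD t (i + n) v) (2 * p + 1)) := by
    intro p hp1 hp2 hpanc
    have hc1 : 2 * p ≠ i + n := by
      intro hc; exact hpanc ⟨1, by norm_num, by omega⟩
    have hc2 : 2 * p + 1 ≠ i + n := by
      intro hc; exact hpanc ⟨1, by norm_num, by omega⟩
    rw [hgetT (2*p) (by omega), if_neg hc1, hgetT (2*p+1) (by omega), if_neg hc2,
      hgetT p (by omega), if_neg (by omega)]
    exact hint p hp1 hp2
  obtain ⟨L, Lv, Lint⟩ := uloop n h1 64 (PySem.List.pySetD t (i + n) v) (i + n)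
    (by omega) (by omega) (by norm_num; omega) hlen1 hyp
  refine ⟨h1, by rw [PySem.List.length_pySetD]; exact h2, by rw [segUpdate, L]; exact hlen1, ?_, Lint, ?_⟩
  · intro x hx0 hxn
    rw [segUpdate, Lv (x + n) (by omega), hgetT (x + n) (by omega)]
    have hgetD : segGet (PySem.List.pySetD dp i v) x = if x = i then v else segGet dp x :=
      segGet_set dp i x v hi0 (by omega) hx0
    rw [hgetD]
    by_cases hxi : x = i
    · rw [if_pos hxi, if_pos (by omega)]
    · rw [if_neg hxi, if_neg (by omega), hleaf x hx0 hxn]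
  · intro x hx
    rw [PySem.List.pySetD_of_nonneg dp v hi0] at hx
    rcases List.mem_or_eq_of_mem_set hx with h | h
    · exact hpos x h
    · omega

lemma init_Inv (n : Int) (hn : 1 ≤ n) :
    SegInv n (List.replicate n.toNat (0 : Int)) (List.replicate (2 * n).toNat (0 : Int)) := by
  refine ⟨hn, by simp, by simp, ?_, ?_, ?_⟩
  · intro x _ _; rw [segGet_replicate, segGet_replicate]
  · intro p _ _; rw [segGet_replicate, segGet_replicate, segGet_replicate]; simp
  · intro x hx; rw [List.eq_of_mem_replicate hx]

lemma main_loop (k n : Int) (hn : 1 ≤ n) (hnB : n ≤ 2 ^ 31 + 1) :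
    ∀ (xs : List Int) (dp t : List Int) (ans : Int), SegInv n dp t → (∀ a ∈ xs, 0 ≤ a ∧ a < n) →
      (xs.foldl (fun (st : List Int × Int) a =>
          let premax := segQuery st.1 n (max 0 (a - k)) a
          (segUpdate st.1 n a (premax + 1), max st.2 (premax + 1))) (t, ans)).2
      = (xs.foldl (fun (st : List Int × Int) a =>
          let premax := PySem.List.maxD
            (PySem.List.slice st.1 (some (max 0 (a - k))) (some a)) (fun x => x) 0
          (PySem.List.pySetD st.1 a (premax + 1), max st.2 (premax + 1))) (dp, ans)).2 := by
  intro xs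
  induction xs with
  | nil => intro dp t ans _ _; rfl
  | cons a xs ih =>
    intro dp t ans hInv hbound
    obtain ⟨ha0, han⟩ := hbound a (by simp)
    have hbound' : ∀ b ∈ xs, 0 ≤ b ∧ b < n := fun b hb => hbound b (by simp [hb])
    have hpos := hInv.2.2.2.2.2
    have hlenD := hInv.2.1
    simp only [List.foldl_cons]
    have hBA : PySem.List.maxD
        (PySem.List.slice dp (some (max 0 (a - k))) (some a)) (fun x => x) 0
        = segQuery t n (max 0 (a - k)) a := by
      by_cases hk : max 0 (a - k) ≤ a
      · rw [btop dp n (max 0 (a-k)) a hlenD hpos (le_max_left _ _) hk (by omega),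
          qtop t dp n (max 0 (a-k)) a hInv (le_max_left _ _) hk (by omega) hnB]
      · rw [PySem.List.slice_toNat dp (le_max_left _ _) (by omega),
          show a.toNat - (max 0 (a - k)).toNat = 0 from by omega, List.take_zero]
        rw [segQuery, show (64:Nat) = 63 + 1 from rfl, qloop_empty 63 t _ _ 0 (by omega)]
        rfl
    have hP : 0 ≤ segQuery t n (max 0 (a - k)) a := by
      by_cases hk : max 0 (a - k) ≤ a
      · rw [qtop t dp n (max 0 (a-k)) a hInv (le_max_left _ _) hk (by omega) hnB]
        exact M_ge_acc dp _ _ 0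
      · rw [segQuery, show (64:Nat) = 63 + 1 from rfl, qloop_empty 63 t _ _ 0 (by omega)]
    rw [hBA]
    exact ih (PySem.List.pySetD dp a (segQuery t n (max 0 (a - k)) a + 1))
      (segUpdate t n a (segQuery t n (max 0 (a - k)) a + 1))
      (max ans (segQuery t n (max 0 (a - k)) a + 1))
      (utop t dp n a _ hInv ha0 han (by omega) hnB) hbound'

-- ===== VERDICT (by name: the statement is the Claim_ definition above) =====
theorem lengthOfLIS3_spec : Claim_equal_lengthOfLIS3 := by
  unfold Claim_equal_lengthOfLIS3
  intro nums k hdom hpre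
  obtain ⟨hne, hnn⟩ := hpre
  unfold Spec_lengthOfLIS3
  rcases hmax : PySem.List.max? nums (fun x => x) with _ | m
  · exact absurd ((PySem.List.max?_eq_none_iff nums _).mp hmax) hne
  · have hmem := PySem.List.max?_mem hmax
    have hm0 : 0 ≤ m := hnn m hmem
    have hisMax := PySem.List.max?_isMax hmax
    have hmB : m ≤ 2147483648 := by
      unfold Dom_lengthOfLIS3 at hdom
      simp only [Bool.and_eq_true, List.all_eq_true] at hdom
      have := hdom.1 m hmem
      simp only [pvDomInt, decide_eq_true_eq] at this
      omega
    simp only [lengthOfLIS3, lengthOfLIS3_alt, hmax]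
    exact main_loop k (m + 1) (by omega) (by omega) nums _ _ 1
      (init_Inv (m + 1) (by omega))
      (fun a ha => ⟨hnn a ha, by have := hisMax a ha; simp only at this; omega⟩)
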